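-- pv_equiv track=rewrite | github.com/skvcool-rgb/KOS-Organism | kos/grid_primitives.py | ray_fill_all
-- ===== SOURCE A (Python) =====
-- from typing import Any, Callable, Dict, List, Tuple
-- from collections import Counter
--
-- Grid = List[List[int]]
--
-- def color_counts(g: Grid) -> Counter:
--     return Counter(c for row in g for c in row)
--
-- def ray_fill_all(g: Grid) -> Grid:
--     """Extend each non-bg color in all 4 cardinal directions."""
--     if not g or not g[0]: return g
--     bg = color_counts(g).most_common(1)[0][0]
--     rows, cols = len(g), len(g[0])
--     result = [row[:] for row in g]
--     for i in range(rows):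
--         for j in range(cols):
--             if g[i][j] == bg:
--                 continue
--             c = g[i][j]
--             # Right
--             for k in range(j+1, cols):
--                 if g[i][k] != bg: break
--                 result[i][k] = c
--             # Left
--             for k in range(j-1, -1, -1):
--                 if g[i][k] != bg: break
--                 result[i][k] = c
--             # Down
--             for k in range(i+1, rows):
--                 if g[k][j] != bg: break
--                 result[k][j] = c
--             # Up
--             for k in range(i-1, -1, -1):
--                 if g[k][j] != bg: break
--                 result[k][j] = c
--     return result
-- ===== SOURCE B (Python) =====
-- from collections import Counter
--
-- def ray_fill_all(g):
--     """Four linear sweeps (from above, left, right, below), later sweeps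
--     overwriting earlier ones, instead of per-cell ray painting."""
--     if not g or not g[0]: return g
--     bg = Counter(c for row in g for c in row).most_common(1)[0][0]
--
--     def sweep(gr, outr):
--         res = []
--         cur = None
--         for a, b in zip(gr, outr):
--             if a != bg:
--                 cur = a
--                 res.append(b)
--             elif cur is not None:
--                 res.append(cur)
--             else:
--                 res.append(b)
--         return res
--
--     def sweep_rev(gr, outr):
--         return sweep(gr[::-1], outr[::-1])[::-1]
--
--     def T(m):
--         return [list(c) for c in zip(*m)]
--
--     gT = T(g)
--     out = T([sweep(c, c) for c in gT])                               # fill from above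
--     out = [sweep(gr, orow) for gr, orow in zip(g, out)]              # fill from left
--     out = [sweep_rev(gr, orow) for gr, orow in zip(g, out)]          # fill from right
--     out = T([sweep_rev(c, oc) for c, oc in zip(gT, T(out))])         # fill from below
--     return out
-- ===== Notes on version B (the rewrite author's own statement) =====
-- stated objective: faster
-- what changed: A paints rays outward from every non-bg cell into a mutable copy (last write wins); B instead makes four linear sweeps (from above, left, right, below), each carrying the nearest non-bg colour and overwriting in the order that reproduces A's last-writer priority.
-- outside the precondition, e.g. on ray_fill_all([[1, 2], [2, 2, 2]]): A returns [[1, 1], [1, 2, 2]], B returns [[1, 1], [1, 2]]; on ray_fill_all([[2], [1, 2]]): A returns [[1], [1, 2]], B returns [[1], [1]]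
import Mathlib
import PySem

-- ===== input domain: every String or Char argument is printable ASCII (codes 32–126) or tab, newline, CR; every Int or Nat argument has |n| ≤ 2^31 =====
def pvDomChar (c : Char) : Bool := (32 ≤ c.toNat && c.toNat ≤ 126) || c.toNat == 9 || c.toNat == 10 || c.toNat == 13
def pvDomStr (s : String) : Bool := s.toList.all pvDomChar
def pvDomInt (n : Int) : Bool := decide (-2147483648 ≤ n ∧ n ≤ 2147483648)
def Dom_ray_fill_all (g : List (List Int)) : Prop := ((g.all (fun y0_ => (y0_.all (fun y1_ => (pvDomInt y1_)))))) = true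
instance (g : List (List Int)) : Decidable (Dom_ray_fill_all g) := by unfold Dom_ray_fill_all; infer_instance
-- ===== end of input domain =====

-- B replaces A's per-cell ray painting (O(R*C*(R+C))) by four linear sweeps over the grid;
-- equivalence is proved on rectangular grids (Pre_), about the RETURN value only (A does not mutate its argument).

-- ===== PORT A =====
-- shared bg computation: both Pythons run Counter(c for row in g for c in row).most_common(1)[0][0]
-- most_common(1)[0][0] ported by hand: first item of the counter attaining the maximal count
-- (heapq.nlargest(1) = stable sort desc [:1], ties keep insertion order); exact on nonempty grids.
def bgOf (g : List (List Int)) : Int :=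
  match (PySem.Dict.counter (g.flatMap id)).items with
  | [] => 0   -- unreachable: callers guard on a nonempty grid
  | kv :: rest => (rest.foldl (fun best p => if p.2 > best.2 then p else best) kv).1

-- g[i][j] for in-range Nat indices (all of A's indices come from range(...) bounds); exact there
def pvVal (m : List (List Int)) (i j : Nat) : Int := (m.getD i []).getD j 0

-- result[i][k] = c for in-range Nat indices; exact there
def pvSet (m : List (List Int)) (i k : Nat) (c : Int) : List (List Int) :=
  m.modify i (fun row => row.set k c)

-- 'for k in ...: if g[i][k] != bg: break; result[i][k] = c' over the index list ks (a horizontal ray)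
def pvRayRow (g : List (List Int)) (bg c : Int) (i : Nat) (ks : List Nat)
    (res : List (List Int)) : List (List Int) :=
  match ks with
  | [] => res
  | k :: ks' => if pvVal g i k ≠ bg then res else pvRayRow g bg c i ks' (pvSet res i k c)

-- same loop for a vertical ray: reads g[k][j], writes result[k][j]
def pvRayCol (g : List (List Int)) (bg c : Int) (j : Nat) (ks : List Nat)
    (res : List (List Int)) : List (List Int) :=
  match ks with
  | [] => res
  | k :: ks' => if pvVal g k j ≠ bg then res else pvRayCol g bg c j ks' (pvSet res k j c)

-- range(a,b) over nonnegative bounds ported as List.range' a (b-a) / (List.range j).reverse; exact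
def ray_fill_all (g : List (List Int)) : List (List Int) :=
  if g = [] ∨ g.headD [] = [] then g
  else
    let bg := bgOf g
    let rows := g.length
    let cols := (g.headD []).length
    -- result = [row[:] for row in g] is a value-copy of g
    (List.range rows).foldl (fun res i =>
      (List.range cols).foldl (fun res j =>
        if pvVal g i j = bg then res
        else
          let c := pvVal g i j
          let res := pvRayRow g bg c i (List.range' (j+1) (cols - (j+1))) res   -- Right
          let res := pvRayRow g bg c i ((List.range j).reverse) res            -- Left
          let res := pvRayCol g bg c j (List.range' (i+1) (rows - (i+1))) res  -- Down
          pvRayCol g bg c j ((List.range i).reverse) res                       -- Up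
        ) res) g

-- ===== PORT B =====
-- Source B's sweep(gr, outr): one pass over zip(gr, outr) carrying the last non-bg colour seen
def pvSweep (bg : Int) (cur : Option Int) : List Int → List Int → List Int
  | [], _ => []
  | _ :: _, [] => []
  | a :: gr, b :: outr =>
    if a ≠ bg then b :: pvSweep bg (some a) gr outr
    else match cur with
      | some v => v :: pvSweep bg cur gr outr
      | none => b :: pvSweep bg cur gr outr

-- Source B's sweep_rev
def pvSweepRev (bg : Int) (gr outr : List Int) : List Int :=
  (pvSweep bg none gr.reverse outr.reverse).reverse

-- Source B's T(m) = [list(c) for c in zip(*m)]; ported by hand, exact on rectangular nonempty grids (Pre_)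
def pvT (m : List (List Int)) : List (List Int) :=
  (List.range (m.headD []).length).map (fun j => m.map (fun row => row.getD j 0))

def ray_fill_all_alt (g : List (List Int)) : List (List Int) :=
  if g = [] ∨ g.headD [] = [] then g
  else
    let bg := bgOf g
    let gT := pvT g
    let out := pvT (gT.map (fun c => pvSweep bg none c c))                 -- fill from above
    let out := (g.zip out).map (fun p => pvSweep bg none p.1 p.2)          -- fill from left
    let out := (g.zip out).map (fun p => pvSweepRev bg p.1 p.2)            -- fill from right
    pvT ((gT.zip (pvT out)).map (fun p => pvSweepRev bg p.1 p.2))          -- fill from below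

-- ===== PRECONDITION & SPEC =====
-- Pre_ excludes ragged grids: on rows shorter than the first A raises IndexError, and on rows longer
-- than the first A silently preserves the overhang cells — a Grid is rectangular by intent.
def Pre_ray_fill_all (g : List (List Int)) : Prop :=
  g ≠ [] → g.headD [] ≠ [] → ∀ row ∈ g, row.length = (g.headD []).length

instance (g : List (List Int)) : Decidable (Pre_ray_fill_all g) := by
  unfold Pre_ray_fill_all; infer_instance

def pvWitness_ray_fill_all : List (List Int) := [[0, 0, 0], [0, 1, 0], [0, 0, 2]]

def Spec_ray_fill_all (g : List (List Int)) (out : List (List Int)) : Prop := out = ray_fill_all_alt g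
instance (g : List (List Int)) (out : List (List Int)) : Decidable (Spec_ray_fill_all g out) := by
  unfold Spec_ray_fill_all; infer_instance

-- ===== CLAIM (what is proved, stated in full; the proofs are below) =====
def Claim_equal_ray_fill_all : Prop :=
  ∀ (g : List (List Int)), Dom_ray_fill_all g → Pre_ray_fill_all g →
    Spec_ray_fill_all g (ray_fill_all g)

-- ===== LEMMAS AND PROOFS =====

-- the canonical per-cell value both ports are proved to compute:
-- nearest non-bg below, else right, else left, else above (the order A's last write wins in)
def pvSpecCell (g : List (List Int)) (bg : Int) (r s : Nat) : Int :=
  let row := g.getD r []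
  let col := g.map (fun w => w.getD s 0)
  if pvVal g r s != bg then pvVal g r s
  else
    ((((col.drop (r+1)).filter (fun v => v != bg)).head?).or
      (((((row.drop (s+1)).filter (fun v => v != bg)).head?).or
        ((((row.take s).filter (fun v => v != bg)).getLast?).or
          (((col.take r).filter (fun v => v != bg)).getLast?))))).getD (pvVal g r s)


-- ---- generic option/list helpers ----
theorem pvOption_getD_or {α : Type} (x y : Option α) (d : α) :
    (x.or y).getD d = x.getD (y.getD d) := by cases x <;> simp

theorem pvGetLast?_cons_or {α : Type} (a : α) (l : List α) :
    (a :: l).getLast? = l.getLast?.or (some a) := by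
  cases h : l.getLast? with
  | none => simp [List.getLast?_cons, h]
  | some x => simp [List.getLast?_cons, h]

theorem pvTake_eq_map_range (l : List Int) (n : Nat) (h : n ≤ l.length) :
    l.take n = (List.range n).map (fun t => l.getD t 0) := by
  apply List.ext_getElem
  · simp [Nat.min_eq_left h]
  · intro i h1 h2
    have hi : i < n := by simpa using h2
    have hil : i < l.length := by omega
    simp [List.getElem?_eq_getElem hil]

theorem pvDrop_eq_map_range' (l : List Int) (a : Nat) (h : a ≤ l.length) :
    l.drop a = (List.range' a (l.length - a)).map (fun t => l.getD t 0) := by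
  apply List.ext_getElem
  · simp
  · intro i h1 h2
    have hi : i < l.length - a := by simpa using h2
    have hil : a + i < l.length := by omega
    simp [List.getElem?_eq_getElem hil]

-- ---- shape ----
-- A rectangular shape: R rows, each of length C
def pvShape (m : List (List Int)) (R C : Nat) : Prop :=
  m.length = R ∧ ∀ row ∈ m, row.length = C

theorem pvShape_val {m : List (List Int)} {R C : Nat} (h : pvShape m R C)
    {r : Nat} (hr : r < R) : (m.getD r []).length = C := by
  obtain ⟨h1, h2⟩ := h
  rw [List.getD_eq_getElem m [] (by omega)]
  exact h2 _ (List.getElem_mem _)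

theorem pvShape_pvSet {m : List (List Int)} {R C : Nat} (h : pvShape m R C)
    (i k : Nat) (c : Int) : pvShape (pvSet m i k c) R C := by
  obtain ⟨h1, h2⟩ := h
  refine ⟨by simp [pvSet, h1], ?_⟩
  intro row hrow
  obtain ⟨t, ht, rfl⟩ := List.mem_iff_getElem.mp hrow
  simp only [pvSet, List.getElem_modify]
  split
  · simp only [List.length_set]
    exact h2 _ (by simp only [pvSet, List.length_modify] at ht; exact List.getElem_mem _)
  · exact h2 _ (by simp only [pvSet, List.length_modify] at ht; exact List.getElem_mem _)

theorem pvVal_pvSet {m : List (List Int)} {R C : Nat} (h : pvShape m R C)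
    {i k r s : Nat} (hi : i < R) (hk : k < C) (hr : r < R) (hs : s < C) (c : Int) :
    pvVal (pvSet m i k c) r s = if i = r ∧ k = s then c else pvVal m r s := by
  obtain ⟨h1, h2⟩ := h
  have hrm : r < m.length := by omega
  have hrc : m[r].length = C := h2 _ (List.getElem_mem _)
  unfold pvVal pvSet
  rw [List.getD_eq_getElem _ [] (by simpa using hrm), List.getElem_modify,
      List.getD_eq_getElem m [] hrm]
  by_cases hir : i = r
  · subst hir
    rw [List.getD_eq_getElem _ 0 (by simp [hrc]; omega),
        List.getD_eq_getElem _ 0 (by omega)]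
    simp only [if_true, true_and, List.getElem_set]
  · simp [hir]

-- ---- A-side: rays ----
theorem pvRayRow_shape (g : List (List Int)) (bg c : Int) (i : Nat) (ks : List Nat)
    (res : List (List Int)) {R C : Nat} (h : pvShape res R C) :
    pvShape (pvRayRow g bg c i ks res) R C := by
  induction ks generalizing res with
  | nil => exact h
  | cons k ks ih =>
    simp only [pvRayRow]
    split
    · exact h
    · exact ih _ (pvShape_pvSet h i k c)

theorem pvRayCol_shape (g : List (List Int)) (bg c : Int) (j : Nat) (ks : List Nat)
    (res : List (List Int)) {R C : Nat} (h : pvShape res R C) :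
    pvShape (pvRayCol g bg c j ks res) R C := by
  induction ks generalizing res with
  | nil => exact h
  | cons k ks ih =>
    simp only [pvRayCol]
    split
    · exact h
    · exact ih _ (pvShape_pvSet h k j c)

theorem pvRayRow_val (g : List (List Int)) (bg c : Int) (i : Nat) (ks : List Nat)
    (res : List (List Int)) {R C : Nat} (h : pvShape res R C)
    {r s : Nat} (hi : i < R) (hr : r < R) (hs : s < C) (hks : ∀ k ∈ ks, k < C) :
    pvVal (pvRayRow g bg c i ks res) r s =
      if r = i ∧ s ∈ ks.takeWhile (fun k => pvVal g i k == bg) then c else pvVal res r s := by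
  induction ks generalizing res with
  | nil => simp [pvRayRow]
  | cons k ks ih =>
    simp only [pvRayRow]
    have hkC : k < C := hks k List.mem_cons_self
    by_cases hpk : pvVal g i k = bg
    · rw [if_neg (by simp [hpk])]
      rw [ih _ (pvShape_pvSet h i k c) (fun t ht => hks _ (List.mem_cons_of_mem _ ht))]
      rw [List.takeWhile_cons_of_pos (by simp [hpk])]
      rw [pvVal_pvSet h hi hkC hr hs c]
      by_cases hri : r = i
      · subst hri
        by_cases hsk : s = k
        · subst hsk; simp
        · have hks2 : k ≠ s := fun hh => hsk hh.symm
          simp [List.mem_cons, hsk, hks2]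
      · simp only [hri, false_and, if_false]
        simp
        intro h1 h2; exfalso; omega
    · rw [if_pos (by simp [hpk])]
      rw [List.takeWhile_cons_of_neg (by simp [hpk])]
      simp

theorem pvRayCol_val (g : List (List Int)) (bg c : Int) (j : Nat) (ks : List Nat)
    (res : List (List Int)) {R C : Nat} (h : pvShape res R C)
    {r s : Nat} (hj : j < C) (hr : r < R) (hs : s < C) (hks : ∀ k ∈ ks, k < R) :
    pvVal (pvRayCol g bg c j ks res) r s =
      if s = j ∧ r ∈ ks.takeWhile (fun k => pvVal g k j == bg) then c else pvVal res r s := by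
  induction ks generalizing res with
  | nil => simp [pvRayCol]
  | cons k ks ih =>
    simp only [pvRayCol]
    have hkR : k < R := hks k List.mem_cons_self
    by_cases hpk : pvVal g k j = bg
    · rw [if_neg (by simp [hpk])]
      rw [ih _ (pvShape_pvSet h k j c) (fun t ht => hks _ (List.mem_cons_of_mem _ ht))]
      rw [List.takeWhile_cons_of_pos (by simp [hpk])]
      rw [pvVal_pvSet h hkR hj hr hs c]
      by_cases hsj : s = j
      · subst hsj
        by_cases hrk : r = k
        · subst hrk; simp
        · have hkr2 : k ≠ r := fun hh => hrk hh.symm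
          simp [List.mem_cons, hrk, hkr2]
      · simp only [hsj, false_and, if_false]
        simp
        intro h1 h2; exfalso; omega
    · rw [if_pos (by simp [hpk])]
      rw [List.takeWhile_cons_of_neg (by simp [hpk])]
      simp

-- ---- A-side: the per-source step over a flattened cell list ----
def pvStep (g : List (List Int)) (bg : Int) (R C : Nat)
    (res : List (List Int)) (p : Nat × Nat) : List (List Int) :=
  if pvVal g p.1 p.2 = bg then res
  else
    pvRayCol g bg (pvVal g p.1 p.2) p.2 ((List.range p.1).reverse)
      (pvRayCol g bg (pvVal g p.1 p.2) p.2 (List.range' (p.1+1) (R - (p.1+1)))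
        (pvRayRow g bg (pvVal g p.1 p.2) p.1 ((List.range p.2).reverse)
          (pvRayRow g bg (pvVal g p.1 p.2) p.1 (List.range' (p.2+1) (C - (p.2+1))) res)))

def pvCells (R C : Nat) : List (Nat × Nat) :=
  (List.range R).flatMap (fun i => (List.range C).map (Prod.mk i))

theorem pvFold_eq_cells (g : List (List Int)) (bg : Int) (R C : Nat) (init : List (List Int)) :
    (List.range R).foldl (fun res i =>
      (List.range C).foldl (fun res j =>
        if pvVal g i j = bg then res
        else
          pvRayCol g bg (pvVal g i j) j ((List.range i).reverse)
            (pvRayCol g bg (pvVal g i j) j (List.range' (i+1) (R - (i+1)))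
              (pvRayRow g bg (pvVal g i j) i ((List.range j).reverse)
                (pvRayRow g bg (pvVal g i j) i (List.range' (j+1) (C - (j+1))) res)))) res) init
    = (pvCells R C).foldl (pvStep g bg R C) init := by
  suffices haux : ∀ (Rb : Nat) (init : List (List Int)),
      (List.range Rb).foldl (fun res i =>
        (List.range C).foldl (fun res j =>
          if pvVal g i j = bg then res
          else
            pvRayCol g bg (pvVal g i j) j ((List.range i).reverse)
              (pvRayCol g bg (pvVal g i j) j (List.range' (i+1) (R - (i+1)))
                (pvRayRow g bg (pvVal g i j) i ((List.range j).reverse)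
                  (pvRayRow g bg (pvVal g i j) i (List.range' (j+1) (C - (j+1))) res)))) res) init
      = ((List.range Rb).flatMap (fun i => (List.range C).map (Prod.mk i))).foldl
          (pvStep g bg R C) init by
    exact haux R init
  intro Rb
  induction Rb with
  | zero => intro init; rfl
  | succ n ih =>
    intro init
    rw [List.range_succ, List.foldl_append, List.flatMap_append, List.foldl_append, ih]
    simp only [List.flatMap_cons, List.flatMap_nil, List.append_nil, List.foldl_map]
    rfl

-- which source (i,j) writes target (r,s) in A
def pvWb (g : List (List Int)) (bg : Int) (R C i j r s : Nat) : Bool :=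
  (pvVal g i j != bg) &&
    ((i == r && ((List.range' (j+1) (C - (j+1))).takeWhile (fun k => pvVal g i k == bg)).contains s)
    || (i == r && (((List.range j).reverse).takeWhile (fun k => pvVal g i k == bg)).contains s)
    || (j == s && ((List.range' (i+1) (R - (i+1))).takeWhile (fun k => pvVal g k j == bg)).contains r)
    || (j == s && (((List.range i).reverse).takeWhile (fun k => pvVal g k j == bg)).contains r))

theorem pvStep_shape (g : List (List Int)) (bg : Int) (R C : Nat)
    (res : List (List Int)) (p : Nat × Nat) (h : pvShape res R C) :
    pvShape (pvStep g bg R C res p) R C := by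
  unfold pvStep
  split
  · exact h
  · exact pvRayCol_shape _ _ _ _ _ _ (pvRayCol_shape _ _ _ _ _ _
      (pvRayRow_shape _ _ _ _ _ _ (pvRayRow_shape _ _ _ _ _ _ h)))

theorem pvStep_val (g : List (List Int)) (bg : Int) (R C : Nat)
    (res : List (List Int)) (h : pvShape res R C) (i j r s : Nat)
    (hi : i < R) (hj : j < C) (hr : r < R) (hs : s < C) :
    pvVal (pvStep g bg R C res (i, j)) r s =
      if pvWb g bg R C i j r s then pvVal g i j else pvVal res r s := by
  unfold pvStep
  by_cases hbg : pvVal g i j = bg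
  · have hw : pvWb g bg R C i j r s = false := by simp [pvWb, hbg]
    simp [hbg, hw]
  · simp only [if_neg hbg]
    have sh1 : pvShape (pvRayRow g bg (pvVal g i j) i (List.range' (j+1) (C - (j+1))) res) R C :=
      pvRayRow_shape _ _ _ _ _ _ h
    have sh2 : pvShape (pvRayRow g bg (pvVal g i j) i ((List.range j).reverse) _) R C :=
      pvRayRow_shape _ _ _ _ _ _ sh1
    have sh3 : pvShape (pvRayCol g bg (pvVal g i j) j (List.range' (i+1) (R - (i+1))) _) R C :=
      pvRayCol_shape _ _ _ _ _ _ sh2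
    rw [pvRayCol_val g bg _ j _ _ sh3 hj hr hs
        (by intro k hk; simp [List.mem_range] at hk; omega)]
    rw [pvRayCol_val g bg _ j _ _ sh2 hj hr hs
        (by intro k hk; simp [List.mem_range'_1] at hk; omega)]
    rw [pvRayRow_val g bg _ i _ _ sh1 hi hr hs
        (by intro k hk; simp [List.mem_range] at hk; omega)]
    rw [pvRayRow_val g bg _ i _ _ h hi hr hs
        (by intro k hk; simp [List.mem_range'_1] at hk; omega)]
    simp only [pvWb, Bool.and_eq_true, Bool.or_eq_true, beq_iff_eq, bne_iff_ne,
      List.contains_iff_mem]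
    split_ifs <;> simp_all <;> tauto

theorem pvFold_val (g : List (List Int)) (bg : Int) (R C : Nat) (r s : Nat)
    (hr : r < R) (hs : s < C) (cl : List (Nat × Nat))
    (hcl : ∀ p ∈ cl, p.1 < R ∧ p.2 < C) (res : List (List Int)) (h : pvShape res R C) :
    pvVal (cl.foldl (pvStep g bg R C) res) r s =
      match (cl.filter (fun p => pvWb g bg R C p.1 p.2 r s)).getLast? with
      | some p => pvVal g p.1 p.2
      | none => pvVal res r s := by
  induction cl generalizing res with
  | nil => simp
  | cons p t ih =>
    obtain ⟨i, j⟩ := p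
    have hij := hcl (i, j) List.mem_cons_self
    rw [List.foldl_cons, ih (fun q hq => hcl q (List.mem_cons_of_mem _ hq)) _
        (pvStep_shape g bg R C res (i, j) h)]
    rw [List.filter_cons]
    by_cases hw : pvWb g bg R C i j r s = true
    · simp only [hw, if_true, pvGetLast?_cons_or]
      cases hft : (t.filter (fun p => pvWb g bg R C p.1 p.2 r s)).getLast? with
      | some q => simp [hft]
      | none =>
        simp only [hft, Option.none_or]
        rw [pvStep_val g bg R C res h i j r s hij.1 hij.2 hr hs]
        simp [hw]
    · have hw' : pvWb g bg R C i j r s = false := by simpa using hw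
      simp only [hw', Bool.false_eq_true, if_false]
      cases hft : (t.filter (fun p => pvWb g bg R C p.1 p.2 r s)).getLast? with
      | some q => simp [hft]
      | none =>
        simp only [hft]
        rw [pvStep_val g bg R C res h i j r s hij.1 hij.2 hr hs, hw']
        simp

-- ---- characterizations of takeWhile/filter over index ranges ----
theorem pvMem_takeWhile_range' (a n x : Nat) (p : Nat → Bool) :
    x ∈ (List.range' a n).takeWhile p ↔ (a ≤ x ∧ x < a + n ∧ ∀ t, a ≤ t → t ≤ x → p t) := by
  induction n generalizing a with
  | zero => simp; omega
  | succ n ih =>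
    rw [List.range'_succ]
    by_cases hpa : p a
    · rw [List.takeWhile_cons_of_pos hpa]
      simp only [List.mem_cons, ih (a+1)]
      constructor
      · rintro (rfl | ⟨h1, h2, h3⟩)
        · exact ⟨le_refl _, by omega, fun t ht1 ht2 => by
            have : t = x := by omega
            subst this; exact hpa⟩
        · exact ⟨by omega, by omega, fun t ht1 ht2 => by
            by_cases hta : t = a
            · subst hta; exact hpa
            · exact h3 t (by omega) ht2⟩
      · rintro ⟨h1, h2, h3⟩
        by_cases hxa : x = a
        · exact Or.inl hxa
        · exact Or.inr ⟨by omega, by omega, fun t ht1 ht2 => h3 t (by omega) ht2⟩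
    · rw [List.takeWhile_cons_of_neg (by simpa using hpa)]
      simp only [List.not_mem_nil, false_iff]
      rintro ⟨h1, h2, h3⟩
      exact hpa (h3 a (le_refl _) h1)

theorem pvMem_takeWhile_range_rev (j x : Nat) (p : Nat → Bool) :
    x ∈ ((List.range j).reverse).takeWhile p ↔ (x < j ∧ ∀ t, x ≤ t → t < j → p t) := by
  induction j with
  | zero => simp
  | succ n ih =>
    rw [List.range_succ, List.reverse_append]
    simp only [List.reverse_cons, List.reverse_nil, List.nil_append, List.cons_append,
      List.singleton_append]
    by_cases hpn : p n
    · rw [List.takeWhile_cons_of_pos hpn]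
      simp only [List.mem_cons, ih]
      constructor
      · rintro (rfl | ⟨h1, h2⟩)
        · exact ⟨by omega, fun t ht1 ht2 => by
            have : t = x := by omega
            subst this; exact hpn⟩
        · exact ⟨by omega, fun t ht1 ht2 => by
            by_cases htn : t = n
            · subst htn; exact hpn
            · exact h2 t ht1 (by omega)⟩
      · rintro ⟨h1, h2⟩
        by_cases hxn : x = n
        · exact Or.inl hxn
        · exact Or.inr ⟨by omega, fun t ht1 ht2 => h2 t ht1 (by omega)⟩
    · rw [List.takeWhile_cons_of_neg (by simpa using hpn)]
      simp only [List.not_mem_nil, false_iff]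
      rintro ⟨h1, h2⟩
      exact hpn (h2 n (by omega) (by omega))

theorem pvGetLast?_filter_range_some (n x : Nat) (p : Nat → Bool) :
    ((List.range n).filter p).getLast? = some x ↔
      (x < n ∧ p x ∧ ∀ t, x < t → t < n → ¬ p t) := by
  induction n with
  | zero => simp
  | succ n ih =>
    rw [List.range_succ, List.filter_append, List.getLast?_append]
    by_cases hpn : p n
    · simp only [List.filter_cons, hpn, if_true, List.filter_nil]
      simp only [List.getLast?_cons, List.getLast?_nil, Option.getD_none, Option.some_or]
      constructor
      · rintro h
        have hxn : x = n := by simpa using h.symm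
        subst hxn
        exact ⟨by omega, hpn, fun t ht1 ht2 => by omega⟩
      · rintro ⟨h1, h2, h3⟩
        by_cases hxn : x = n
        · simp [hxn]
        · exact absurd hpn (h3 n (by omega) (by omega))
    · simp only [List.filter_cons, hpn, Bool.false_eq_true, if_false, List.filter_nil,
        List.getLast?_nil, Option.none_or]
      rw [ih]
      constructor
      · rintro ⟨h1, h2, h3⟩
        refine ⟨by omega, h2, fun t ht1 ht2 => ?_⟩
        by_cases htn : t = n
        · subst htn; exact hpn
        · exact h3 t ht1 (by omega)
      · rintro ⟨h1, h2, h3⟩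
        have hxn : x ≠ n := fun hh => by subst hh; exact hpn h2
        exact ⟨by omega, h2, fun t ht1 ht2 => h3 t ht1 (by omega)⟩

theorem pvHead?_filter_range'_some (a n x : Nat) (p : Nat → Bool) :
    ((List.range' a n).filter p).head? = some x ↔
      (a ≤ x ∧ x < a + n ∧ p x ∧ ∀ t, a ≤ t → t < x → ¬ p t) := by
  induction n generalizing a with
  | zero => simp; omega
  | succ n ih =>
    rw [List.range'_succ, List.filter_cons]
    by_cases hpa : p a
    · simp only [hpa, if_true, List.head?_cons]
      constructor
      · rintro h
        have hxa : x = a := by simpa using h.symm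
        subst hxa
        exact ⟨le_refl _, by omega, hpa, fun t ht1 ht2 => by omega⟩
      · rintro ⟨h1, h2, h3, h4⟩
        by_cases hxa : x = a
        · simp [hxa]
        · exact absurd hpa (h4 a (le_refl _) (by omega))
    · simp only [hpa, Bool.false_eq_true, if_false]
      rw [ih (a+1)]
      constructor
      · rintro ⟨h1, h2, h3, h4⟩
        refine ⟨by omega, by omega, h3, fun t ht1 ht2 => ?_⟩
        by_cases hta : t = a
        · subst hta; exact hpa
        · exact h4 t (by omega) ht2
      · rintro ⟨h1, h2, h3, h4⟩
        have hxa : x ≠ a := fun hh => by subst hh; exact hpa h3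
        exact ⟨by omega, by omega, h3, fun t ht1 ht2 => h4 t (by omega) ht2⟩

-- ---- the four candidate writers of a bg target cell (r,s) ----
def pvAIdx (g : List (List Int)) (bg : Int) (r s : Nat) : Option Nat :=
  ((List.range s).filter (fun t => pvVal g r t != bg)).getLast?
def pvBIdx (g : List (List Int)) (bg : Int) (C r s : Nat) : Option Nat :=
  ((List.range' (s+1) (C - (s+1))).filter (fun t => pvVal g r t != bg)).head?
def pvUIdx (g : List (List Int)) (bg : Int) (r s : Nat) : Option Nat :=
  ((List.range r).filter (fun t => pvVal g t s != bg)).getLast?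
def pvDIdx (g : List (List Int)) (bg : Int) (R r s : Nat) : Option Nat :=
  ((List.range' (r+1) (R - (r+1))).filter (fun t => pvVal g t s != bg)).head?

theorem pvWb_of_nonbg (g : List (List Int)) (bg : Int) (R C i j r s : Nat)
    (hbg : pvVal g r s ≠ bg) : pvWb g bg R C i j r s = false := by
  rw [Bool.eq_false_iff]
  intro hW
  simp only [pvWb, Bool.and_eq_true, Bool.or_eq_true, beq_iff_eq, bne_iff_ne,
    List.contains_iff_mem] at hW
  obtain ⟨hne, hcl⟩ := hW
  rcases hcl with ((⟨h1, hmem⟩ | ⟨h1, hmem⟩) | ⟨h1, hmem⟩) | ⟨h1, hmem⟩ <;>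
    subst h1 <;>
    (have hp := List.mem_takeWhile_imp hmem; simp only [beq_iff_eq] at hp; exact hbg hp)

theorem pvWb_iff (g : List (List Int)) (bg : Int) (R C : Nat) (r s : Nat)
    (hr : r < R) (hs : s < C) (hbg : pvVal g r s = bg) (i j : Nat) (hi : i < R) (hj : j < C) :
    pvWb g bg R C i j r s = true ↔
      ((i = r ∧ pvAIdx g bg r s = some j) ∨ (i = r ∧ pvBIdx g bg C r s = some j) ∨
       (j = s ∧ pvUIdx g bg r s = some i) ∨ (j = s ∧ pvDIdx g bg R r s = some i)) := by
  unfold pvAIdx pvBIdx pvUIdx pvDIdx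
  rw [pvGetLast?_filter_range_some, pvHead?_filter_range'_some,
      pvGetLast?_filter_range_some, pvHead?_filter_range'_some]
  simp only [pvWb, Bool.and_eq_true, Bool.or_eq_true, beq_iff_eq, bne_iff_ne,
    List.contains_iff_mem, pvMem_takeWhile_range', pvMem_takeWhile_range_rev,
    ne_eq, not_not]
  constructor
  · rintro ⟨hne, hcl⟩
    rcases hcl with ((⟨h1, hm1, hm2, hm3⟩ | ⟨h1, hm⟩) | ⟨h1, hm1, hm2, hm3⟩) | ⟨h1, hm⟩
    · subst h1
      exact Or.inl ⟨rfl, by omega, hne, fun t ht1 ht2 => hm3 t (by omega) (by omega)⟩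
    · subst h1
      obtain ⟨hm1, hm2⟩ := hm
      refine Or.inr (Or.inl ⟨rfl, by omega, by omega, hne, fun t ht1 ht2 => ?_⟩)
      exact hm2 t (by omega) (by omega)
    · subst h1
      exact Or.inr (Or.inr (Or.inl ⟨rfl, by omega, hne, fun t ht1 ht2 =>
        hm3 t (by omega) (by omega)⟩))
    · subst h1
      obtain ⟨hm1, hm2⟩ := hm
      refine Or.inr (Or.inr (Or.inr ⟨rfl, by omega, by omega, hne, fun t ht1 ht2 => ?_⟩))
      exact hm2 t (by omega) (by omega)
  · rintro (⟨h1, hlt, hp, hall⟩ | ⟨h1, hle, hlt, hp, hall⟩ |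
            ⟨h1, hlt, hp, hall⟩ | ⟨h1, hle, hlt, hp, hall⟩)
    · subst h1
      refine ⟨hp, Or.inl (Or.inl (Or.inl ⟨rfl, by omega, by omega, fun t ht1 ht2 => ?_⟩))⟩
      by_cases hts : t = s
      · subst hts; exact hbg
      · exact hall t (by omega) (by omega)
    · subst h1
      refine ⟨hp, Or.inl (Or.inl (Or.inr ⟨rfl, ⟨by omega, fun t ht1 ht2 => ?_⟩⟩))⟩
      by_cases hts : t = s
      · subst hts; exact hbg
      · exact hall t (by omega) (by omega)
    · subst h1
      refine ⟨hp, Or.inl (Or.inr ⟨rfl, by omega, by omega, fun t ht1 ht2 => ?_⟩)⟩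
      by_cases htr : t = r
      · subst htr; exact hbg
      · exact hall t (by omega) (by omega)
    · subst h1
      refine ⟨hp, Or.inr ⟨rfl, ⟨by omega, fun t ht1 ht2 => ?_⟩⟩⟩
      by_cases htr : t = r
      · subst htr; exact hbg
      · exact hall t (by omega) (by omega)

-- ---- filter over the cell list = the (up to) four writers in row-major order ----
theorem pvFilter_range_none (n : Nat) (P : Nat → Bool) (h : ∀ j, j < n → ¬ P j) :
    (List.range n).filter P = [] := by
  rw [List.filter_eq_nil_iff]
  intro a ha
  exact h a (List.mem_range.mp ha)

theorem pvFilter_range_single (n x : Nat) (P : Nat → Bool) (hx : x < n)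
    (h : ∀ j, j < n → (P j = true ↔ j = x)) : (List.range n).filter P = [x] := by
  induction n with
  | zero => omega
  | succ n ih =>
    rw [List.range_succ, List.filter_append]
    by_cases hxn : x = n
    · subst hxn
      rw [pvFilter_range_none x P (fun j hj hP => by have := (h j (by omega)).mp hP; omega)]
      simp only [List.filter_cons, List.filter_nil]
      rw [if_pos ((h x (by omega)).mpr rfl)]
      simp
    · have hx : x < n := by omega
      rw [ih hx (fun j hj => h j (by omega))]
      simp only [List.filter_cons, List.filter_nil]
      rw [if_neg (fun hP => hxn ((h n (by omega)).mp hP).symm)]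
      simp

theorem pvFilter_range_pair (n x y : Nat) (P : Nat → Bool) (hxy : x < y) (hy : y < n)
    (h : ∀ j, j < n → (P j = true ↔ (j = x ∨ j = y))) : (List.range n).filter P = [x, y] := by
  induction n with
  | zero => omega
  | succ n ih =>
    rw [List.range_succ, List.filter_append]
    by_cases hyn : y = n
    · subst hyn
      rw [pvFilter_range_single y x P (by omega) (fun j hj => by
        rw [h j (by omega)]
        constructor
        · rintro (rfl | rfl); rfl; omega
        · rintro rfl; exact Or.inl rfl)]
      simp only [List.filter_cons, List.filter_nil]
      rw [if_pos ((h y (by omega)).mpr (Or.inr rfl))]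
      simp
    · have hy : y < n := by omega
      rw [ih hy (fun j hj => h j (by omega))]
      simp only [List.filter_cons, List.filter_nil]
      rw [if_neg (fun hP => by rcases (h n (by omega)).mp hP with rfl | rfl <;> omega)]
      simp

theorem pvFlatMap_range'_opt {α : Type} (a n : Nat) (f : Nat → List α) (o : Option Nat)
    (w : Nat → List α) (h : ∀ i, a ≤ i → i < a + n → f i = (if o = some i then w i else []))
    (hb : ∀ x, o = some x → a ≤ x ∧ x < a + n) :
    (List.range' a n).flatMap f = ((o.map w).getD []) := by
  induction n generalizing a with
  | zero =>
    cases o with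
    | none => simp
    | some x => have := hb x rfl; omega
  | succ n ih =>
    rw [List.range'_succ, List.flatMap_cons]
    cases o with
    | none =>
      rw [h a (le_refl _) (by omega), if_neg (by simp)]
      simpa using ih (a+1) (fun i h1 h2 => h i (by omega) (by omega)) (fun y hy => by cases hy)
    | some x =>
      by_cases hxa : x = a
      · rw [h a (le_refl _) (by omega), if_pos (by rw [hxa])]
        have hrest : (List.range' (a+1) n).flatMap f = [] := by
          rw [List.flatMap_eq_nil_iff]
          intro i hi
          rw [List.mem_range'_1] at hi
          rw [h i (by omega) (by omega), if_neg (fun hc => by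
            have hxi : x = i := Option.some.inj hc
            omega)]
        rw [hrest]
        simp [hxa]
      · have hax := hb x rfl
        rw [h a (le_refl _) (by omega), if_neg (fun hc => hxa (Option.some.inj hc))]
        simp only [List.nil_append]
        exact ih (a+1) (fun i h1 h2 => h i (by omega) (by omega)) (fun y hy => by
          have hyx : x = y := Option.some.inj hy
          subst hyx; omega)

theorem pvAIdx_lt (g : List (List Int)) (bg : Int) (r s x : Nat)
    (h : pvAIdx g bg r s = some x) : x < s := by
  unfold pvAIdx at h
  rw [pvGetLast?_filter_range_some] at h
  exact h.1

theorem pvBIdx_bounds (g : List (List Int)) (bg : Int) (C r s x : Nat) (hs : s < C)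
    (h : pvBIdx g bg C r s = some x) : s < x ∧ x < C := by
  unfold pvBIdx at h
  rw [pvHead?_filter_range'_some] at h
  obtain ⟨h1, h2, -⟩ := h
  omega

theorem pvUIdx_lt (g : List (List Int)) (bg : Int) (r s x : Nat)
    (h : pvUIdx g bg r s = some x) : x < r := by
  unfold pvUIdx at h
  rw [pvGetLast?_filter_range_some] at h
  exact h.1

theorem pvDIdx_bounds (g : List (List Int)) (bg : Int) (R r s x : Nat) (hr : r < R)
    (h : pvDIdx g bg R r s = some x) : r < x ∧ x < R := by
  unfold pvDIdx at h
  rw [pvHead?_filter_range'_some] at h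
  obtain ⟨h1, h2, -⟩ := h
  omega

theorem pvCells_filter (g : List (List Int)) (bg : Int) (R C : Nat) (r s : Nat)
    (hr : r < R) (hs : s < C) (hbg : pvVal g r s = bg) :
    (pvCells R C).filter (fun p => pvWb g bg R C p.1 p.2 r s) =
      ((pvUIdx g bg r s).map (fun u => (u, s))).toList ++
      ((pvAIdx g bg r s).map (fun a => (r, a))).toList ++
      ((pvBIdx g bg C r s).map (fun b => (r, b))).toList ++
      ((pvDIdx g bg R r s).map (fun d => (d, s))).toList := by
  have hsplit : List.range R = List.range' 0 r ++ r :: List.range' (r+1) (R - (r+1)) := by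
    have h1 : List.range' 0 r ++ List.range' r (R - r) = List.range' 0 R := by
      have h0 := List.range'_append (s := 0) (m := r) (n := R - r) (step := 1)
      simpa [show r + (R - r) = R by omega] using h0
    have h2 : List.range' r (R - r) = r :: List.range' (r+1) (R - (r+1)) := by
      rw [show R - r = (R - (r+1)) + 1 by omega, List.range'_succ]
    rw [List.range_eq_range', ← h1, h2]
  have hrow : ∀ i, i < R → i ≠ r →
      ((List.range C).map (Prod.mk i)).filter (fun p => pvWb g bg R C p.1 p.2 r s)
      = (if pvUIdx g bg r s = some i ∨ pvDIdx g bg R r s = some i then [(i, s)] else []) := by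
    intro i hiR hir
    rw [List.filter_map]
    by_cases hid : pvUIdx g bg r s = some i ∨ pvDIdx g bg R r s = some i
    · have hiff : ∀ j, j < C →
          (((fun p => pvWb g bg R C p.1 p.2 r s) ∘ Prod.mk i) j = true ↔ j = s) := by
        intro j hj
        rw [show ((fun p => pvWb g bg R C p.1 p.2 r s) ∘ Prod.mk i) j =
          pvWb g bg R C i j r s from rfl, pvWb_iff g bg R C r s hr hs hbg i j hiR hj]
        constructor
        · rintro (⟨h, -⟩ | ⟨h, -⟩ | ⟨h, -⟩ | ⟨h, -⟩)
          · omega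
          · omega
          · exact h
          · exact h
        · rintro rfl
          rcases hid with hU | hD
          · exact Or.inr (Or.inr (Or.inl ⟨rfl, hU⟩))
          · exact Or.inr (Or.inr (Or.inr ⟨rfl, hD⟩))
      rw [if_pos hid, pvFilter_range_single C s _ hs hiff]
      simp
    · have hnone : ∀ j, j < C →
          ¬ ((fun p => pvWb g bg R C p.1 p.2 r s) ∘ Prod.mk i) j := by
        intro j hj hP
        rw [show ((fun p => pvWb g bg R C p.1 p.2 r s) ∘ Prod.mk i) j =
          pvWb g bg R C i j r s from rfl,
          pvWb_iff g bg R C r s hr hs hbg i j hiR hj] at hP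
        rcases hP with ⟨h, -⟩ | ⟨h, -⟩ | ⟨-, hU⟩ | ⟨-, hD⟩
        · omega
        · omega
        · exact hid (Or.inl hU)
        · exact hid (Or.inr hD)
      rw [if_neg hid, pvFilter_range_none C _ hnone]
      simp
  unfold pvCells
  rw [hsplit, List.flatMap_append, List.flatMap_cons, List.filter_append, List.filter_append]
  have hseg2 : ((List.range C).map (Prod.mk r)).filter (fun p => pvWb g bg R C p.1 p.2 r s)
      = ((pvAIdx g bg r s).map (fun a => (r, a))).toList ++
        ((pvBIdx g bg C r s).map (fun b => (r, b))).toList := by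
    rw [List.filter_map]
    have key : ∀ j, j < C → (((fun p => pvWb g bg R C p.1 p.2 r s) ∘ Prod.mk r) j = true ↔
        (pvAIdx g bg r s = some j ∨ pvBIdx g bg C r s = some j)) := by
      intro j hj
      rw [show ((fun p => pvWb g bg R C p.1 p.2 r s) ∘ Prod.mk r) j =
        pvWb g bg R C r j r s from rfl, pvWb_iff g bg R C r s hr hs hbg r j hr hj]
      constructor
      · rintro (⟨-, hA⟩ | ⟨-, hB⟩ | ⟨-, hU⟩ | ⟨-, hD⟩)
        · exact Or.inl hA
        · exact Or.inr hB
        · exact absurd (pvUIdx_lt g bg r s r hU) (by omega)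
        · exact absurd (pvDIdx_bounds g bg R r s r hr hD).1 (by omega)
      · rintro (hA | hB)
        · exact Or.inl ⟨rfl, hA⟩
        · exact Or.inr (Or.inl ⟨rfl, hB⟩)
    cases hA : pvAIdx g bg r s with
    | some a =>
      cases hB : pvBIdx g bg C r s with
      | some b =>
        have hab : a < b := by
          have h1 := pvAIdx_lt g bg r s a hA
          have h2 := pvBIdx_bounds g bg C r s b hs hB
          omega
        rw [pvFilter_range_pair C a b _ hab (pvBIdx_bounds g bg C r s b hs hB).2
          (fun j hj => by rw [key j hj, hA, hB]; simp [eq_comm])]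
        simp
      | none =>
        rw [pvFilter_range_single C a _ (by have := pvAIdx_lt g bg r s a hA; omega)
          (fun j hj => by rw [key j hj, hA, hB]; simp [eq_comm])]
        simp
    | none =>
      cases hB : pvBIdx g bg C r s with
      | some b =>
        rw [pvFilter_range_single C b _ (pvBIdx_bounds g bg C r s b hs hB).2
          (fun j hj => by rw [key j hj, hA, hB]; simp [eq_comm])]
        simp
      | none =>
        rw [pvFilter_range_none C _
          (fun j hj hP => by rw [key j hj, hA, hB] at hP; simp at hP)]
        simp
  have hseg1 : ((List.range' 0 r).flatMap (fun i => (List.range C).map (Prod.mk i))).filter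
        (fun p => pvWb g bg R C p.1 p.2 r s)
      = ((pvUIdx g bg r s).map (fun u => (u, s))).toList := by
    rw [List.filter_flatMap]
    rw [pvFlatMap_range'_opt 0 r _ (pvUIdx g bg r s) (fun u => [(u, s)])
      (fun i h1 h2 => by
        rw [hrow i (by omega) (by omega)]
        by_cases hU : pvUIdx g bg r s = some i
        · rw [if_pos (Or.inl hU), if_pos hU]
        · have hD : ¬ pvDIdx g bg R r s = some i := fun hD =>
            absurd (pvDIdx_bounds g bg R r s i hr hD).1 (by omega)
          rw [if_neg (by tauto), if_neg hU])
      (fun x hx => ⟨by omega, by have := pvUIdx_lt g bg r s x hx; omega⟩)]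
    cases pvUIdx g bg r s <;> simp
  have hseg3 : ((List.range' (r+1) (R - (r+1))).flatMap
        (fun i => (List.range C).map (Prod.mk i))).filter (fun p => pvWb g bg R C p.1 p.2 r s)
      = ((pvDIdx g bg R r s).map (fun d => (d, s))).toList := by
    rw [List.filter_flatMap]
    rw [pvFlatMap_range'_opt (r+1) (R - (r+1)) _ (pvDIdx g bg R r s) (fun d => [(d, s)])
      (fun i h1 h2 => by
        rw [hrow i (by omega) (by omega)]
        by_cases hD : pvDIdx g bg R r s = some i
        · rw [if_pos (Or.inr hD), if_pos hD]
        · have hU : ¬ pvUIdx g bg r s = some i := fun hU =>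
            absurd (pvUIdx_lt g bg r s i hU) (by omega)
          rw [if_neg (by tauto), if_neg hD])
      (fun x hx => by have := pvDIdx_bounds g bg R r s x hr hx; omega)]
    cases pvDIdx g bg R r s <;> simp
  rw [hseg1, hseg2, hseg3]
  simp [List.append_assoc]

-- ---- A-side main lemma ----
theorem pvSpecCell_eq (g : List (List Int)) (bg : Int) {R C : Nat}
    (hg : pvShape g R C) (r s : Nat) (hr : r < R) (hs : s < C) :
    pvSpecCell g bg r s =
      if pvVal g r s != bg then pvVal g r s
      else
        (((pvDIdx g bg R r s).map (fun d => pvVal g d s)).or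
          (((pvBIdx g bg C r s).map (fun b => pvVal g r b)).or
            (((pvAIdx g bg r s).map (fun a => pvVal g r a)).or
              ((pvUIdx g bg r s).map (fun u => pvVal g u s))))).getD (pvVal g r s) := by
  have hrowlen : (g.getD r []).length = C := pvShape_val hg hr
  have hgl : g.length = R := hg.1
  have hml : (g.map (fun w => w.getD s 0)).length = g.length := by simp
  have hcongr : ∀ a n, a + n ≤ R →
      (List.range' a n).map (fun t => (g.map (fun w => w.getD s 0)).getD t 0)
      = (List.range' a n).map (fun t => pvVal g t s) := by
    intro a n han
    apply List.map_congr_left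
    intro t ht
    rw [List.mem_range'_1] at ht
    rw [List.getD_eq_getElem _ 0 (by omega), List.getElem_map]
    unfold pvVal
    rw [List.getD_eq_getElem g [] (by omega)]
  have hA : (((g.getD r []).take s).filter (fun v => v != bg)).getLast?
      = (pvAIdx g bg r s).map (fun t => pvVal g r t) := by
    rw [pvTake_eq_map_range _ s (by omega), List.filter_map, List.getLast?_map]
    rfl
  have hB : (((g.getD r []).drop (s+1)).filter (fun v => v != bg)).head?
      = (pvBIdx g bg C r s).map (fun t => pvVal g r t) := by
    rw [pvDrop_eq_map_range' _ (s+1) (by omega), hrowlen, List.filter_map, List.head?_map]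
    rfl
  have hU : (((g.map (fun w => w.getD s 0)).take r).filter (fun v => v != bg)).getLast?
      = (pvUIdx g bg r s).map (fun t => pvVal g t s) := by
    rw [pvTake_eq_map_range _ r (by omega), List.range_eq_range', hcongr 0 r (by omega),
        List.filter_map, List.getLast?_map, ← List.range_eq_range']
    rfl
  have hD : (((g.map (fun w => w.getD s 0)).drop (r+1)).filter (fun v => v != bg)).head?
      = (pvDIdx g bg R r s).map (fun t => pvVal g t s) := by
    rw [pvDrop_eq_map_range' _ (r+1) (by omega), hml, hgl,
        hcongr (r+1) (R - (r+1)) (by omega), List.filter_map, List.head?_map]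
    rfl
  simp only [pvSpecCell]
  rw [hA, hB, hU, hD]

-- ---- B-side: sweeps ----
def pvF (bg : Int) (cur : Option Int) (l : List Int) : Option Int :=
  l.foldl (fun c a => if a == bg then c else some a) cur

theorem pvSweep_length (bg : Int) (cur : Option Int) (gr outr : List Int) :
    (pvSweep bg cur gr outr).length = min gr.length outr.length := by
  induction gr generalizing outr cur with
  | nil => simp [pvSweep]
  | cons a gr ih =>
    cases outr with
    | nil => simp [pvSweep]
    | cons b outr =>
      by_cases h1 : a ≠ bg
      · simp [pvSweep, h1, ih, Nat.succ_min_succ]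
      · cases cur <;> simp [pvSweep, h1, ih, Nat.succ_min_succ]

theorem pvSweep_val (bg : Int) (cur : Option Int) (gr outr : List Int) (s : Nat)
    (h1 : s < gr.length) (h2 : s < outr.length) :
    (pvSweep bg cur gr outr).getD s 0 =
      if gr.getD s 0 != bg then outr.getD s 0
      else (pvF bg cur (gr.take s)).getD (outr.getD s 0) := by
  induction gr generalizing outr cur s with
  | nil => simp at h1
  | cons a gr ih =>
    cases outr with
    | nil => simp at h2
    | cons b outr =>
      cases s with
      | zero =>
        by_cases hab : a ≠ bg
        · simp [pvSweep, hab, pvF]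
        · have ha : a = bg := not_not.mp hab
          cases cur with
          | some v => simp [pvSweep, hab, ha, pvF]
          | none => simp [pvSweep, hab, ha, pvF]
      | succ s =>
        have hs1 : s < gr.length := by simpa using h1
        have hs2 : s < outr.length := by simpa using h2
        by_cases hab : a ≠ bg
        · simp only [pvSweep, if_pos hab, List.getD_cons_succ, List.take_succ_cons]
          rw [ih (some a) outr s hs1 hs2]
          have hstep : pvF bg cur (a :: gr.take s) = pvF bg (some a) (gr.take s) := by
            have hne : (a == bg) = false := by simpa using hab
            simp only [pvF, List.foldl_cons]
            rw [if_neg (by simpa using hab)]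
          rw [hstep]
        · have ha : a = bg := not_not.mp hab
          cases cur with
          | some v =>
            simp only [pvSweep, if_neg hab, List.getD_cons_succ, List.take_succ_cons]
            rw [ih (some v) outr s hs1 hs2]
            have hstep : pvF bg (some v) (a :: gr.take s) = pvF bg (some v) (gr.take s) := by
              simp [pvF, ha]
            rw [hstep]
          | none =>
            simp only [pvSweep, if_neg hab, List.getD_cons_succ, List.take_succ_cons]
            rw [ih none outr s hs1 hs2]
            have hstep : pvF bg none (a :: gr.take s) = pvF bg none (gr.take s) := by
              simp [pvF, ha]
            rw [hstep]

theorem pvF_eq (bg : Int) (cur : Option Int) (l : List Int) :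
    pvF bg cur l = ((l.filter (fun v => v != bg)).getLast?).or cur := by
  induction l generalizing cur with
  | nil => simp [pvF]
  | cons a l ih =>
    have hstep : pvF bg cur (a :: l) = pvF bg (if a == bg then cur else some a) l := by
      simp [pvF]
    rw [hstep, ih]
    by_cases ha : a = bg
    · simp [ha, List.filter_cons]
    · have hne : (a != bg) = true := by simpa using ha
      simp only [List.filter_cons, hne, if_true, ha, beq_iff_eq, if_false,
        pvGetLast?_cons_or, Option.or_assoc]
      simp [ha]

theorem pvSweepRev_val (bg : Int) (gr outr : List Int) (s : Nat)
    (hlen : gr.length = outr.length) (h1 : s < gr.length) :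
    (pvSweepRev bg gr outr).getD s 0 =
      if gr.getD s 0 != bg then outr.getD s 0
      else (((gr.drop (s+1)).filter (fun v => v != bg)).head?).getD (outr.getD s 0) := by
  have hrev : ∀ (l : List Int) (k : Nat), k < l.length →
      l.reverse.getD k 0 = l.getD (l.length - 1 - k) 0 := by
    intro l k hk
    rw [List.getD_eq_getElem _ 0 (by simpa using hk),
        List.getD_eq_getElem _ 0 (by omega), List.getElem_reverse]
  unfold pvSweepRev
  have hlen2 : (pvSweep bg none gr.reverse outr.reverse).length = gr.length := by
    simp [pvSweep_length, hlen]
  rw [hrev (pvSweep bg none gr.reverse outr.reverse) s (by rw [hlen2]; exact h1), hlen2]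
  rw [pvSweep_val bg none gr.reverse outr.reverse (gr.length - 1 - s)
      (by simp; omega) (by simp [← hlen]; omega)]
  have e1 : gr.reverse.getD (gr.length - 1 - s) 0 = gr.getD s 0 := by
    rw [hrev gr _ (by omega), show gr.length - 1 - (gr.length - 1 - s) = s by omega]
  have e2 : outr.reverse.getD (gr.length - 1 - s) 0 = outr.getD s 0 := by
    rw [hrev outr _ (by omega), show outr.length - 1 - (gr.length - 1 - s) = s by omega]
  have e3 : gr.reverse.take (gr.length - 1 - s) = (gr.drop (s+1)).reverse := by
    rw [List.take_reverse, show gr.length - (gr.length - 1 - s) = s + 1 by omega]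
  rw [e1, e2, e3, pvF_eq, List.filter_reverse, List.getLast?_reverse, Option.or_none]

theorem pvSweepRev_length (bg : Int) (gr outr : List Int) :
    (pvSweepRev bg gr outr).length = min gr.length outr.length := by
  simp [pvSweepRev, pvSweep_length]

-- ---- B-side: transpose ----
theorem pvT_shape {m : List (List Int)} {R C : Nat} (h : pvShape m R C) (hR : 0 < R) :
    pvShape (pvT m) C R := by
  obtain ⟨h1, h2⟩ := h
  have hhead : (m.headD []).length = C := by
    cases m with
    | nil => simp at h1; omega
    | cons row t => exact h2 row List.mem_cons_self
  have hhead' : (m.head?.getD []).length = C := by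
    cases m with
    | nil => simp at h1; omega
    | cons row t => simpa using h2 row List.mem_cons_self
  constructor
  · simp [pvT, hhead']
  · intro row hrow
    simp only [pvT, List.mem_map] at hrow
    obtain ⟨j, -, rfl⟩ := hrow
    simp [h1]

theorem pvT_val {m : List (List Int)} {R C : Nat} (h : pvShape m R C) (hR : 0 < R)
    {i j : Nat} (hi : i < R) (hj : j < C) : pvVal (pvT m) j i = pvVal m i j := by
  obtain ⟨h1, h2⟩ := h
  have hhead : (m.headD []).length = C := by
    cases m with
    | nil => simp at h1; omega
    | cons row t => exact h2 row List.mem_cons_self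
  have hhead' : (m.head?.getD []).length = C := by
    cases m with
    | nil => simp at h1; omega
    | cons row t => simpa using h2 row List.mem_cons_self
  unfold pvVal pvT
  rw [List.getD_eq_getElem _ [] (by simp [hhead']; omega), List.getElem_map,
      List.getElem_range, List.getD_eq_getElem _ 0 (by simp; omega), List.getElem_map,
      List.getD_eq_getElem m [] (by omega)]

theorem pv_a_spec (g : List (List Int)) (bg : Int) (R C : Nat)
    (hR : 0 < R) (hC : 0 < C) (hg : pvShape g R C) (r s : Nat) (hr : r < R) (hs : s < C) :
    pvVal ((List.range R).foldl (fun res i =>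
      (List.range C).foldl (fun res j =>
        if pvVal g i j = bg then res
        else
          pvRayCol g bg (pvVal g i j) j ((List.range i).reverse)
            (pvRayCol g bg (pvVal g i j) j (List.range' (i+1) (R - (i+1)))
              (pvRayRow g bg (pvVal g i j) i ((List.range j).reverse)
                (pvRayRow g bg (pvVal g i j) i (List.range' (j+1) (C - (j+1))) res)))) res) g) r s
      = pvSpecCell g bg r s := by
  rw [pvFold_eq_cells g bg R C g]
  have hcells : ∀ p ∈ pvCells R C, p.1 < R ∧ p.2 < C := by
    intro p hp
    unfold pvCells at hp
    simp only [List.mem_flatMap, List.mem_map, List.mem_range] at hp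
    obtain ⟨i, hi, j, hj, rfl⟩ := hp
    exact ⟨hi, hj⟩
  rw [pvFold_val g bg R C r s hr hs (pvCells R C) hcells g hg]
  by_cases hbg : pvVal g r s = bg
  · rw [pvSpecCell_eq g bg hg r s hr hs]
    have hne : (pvVal g r s != bg) = false := by simp [hbg]
    rw [pvCells_filter g bg R C r s hr hs hbg]
    simp only [hne, Bool.false_eq_true, if_false, List.getLast?_append]
    cases pvDIdx g bg R r s <;> cases pvBIdx g bg C r s <;>
      cases pvAIdx g bg r s <;> cases pvUIdx g bg r s <;>
      simp [Option.or]
  · have hfilter : (pvCells R C).filter (fun p => pvWb g bg R C p.1 p.2 r s) = [] := by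
      rw [List.filter_eq_nil_iff]
      intro p hp
      simp [pvWb_of_nonbg g bg R C p.1 p.2 r s hbg]
    rw [hfilter]
    have hne : (pvVal g r s != bg) = true := by simpa using hbg
    simp [pvSpecCell, hne]

theorem pvGetD_map_row (m : List (List Int)) (f : List Int → List Int) (s : Nat)
    (h : s < m.length) : (m.map f).getD s [] = f (m.getD s []) := by
  rw [List.getD_eq_getElem _ [] (by simpa using h), List.getElem_map,
      List.getD_eq_getElem m [] h]

theorem pvGetD_zip_map (x y : List (List Int)) (f : List Int → List Int → List Int) (r : Nat)
    (hx : r < x.length) (hy : r < y.length) :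
    ((x.zip y).map (fun p => f p.1 p.2)).getD r [] = f (x.getD r []) (y.getD r []) := by
  rw [List.getD_eq_getElem _ [] (by simp; omega), List.getElem_map, List.getElem_zip,
      List.getD_eq_getElem x [] hx, List.getD_eq_getElem y [] hy]

theorem pvT_getD_col (m : List (List Int)) {R C : Nat} (h : pvShape m R C) (hR : 0 < R)
    (s : Nat) (hs : s < C) : (pvT m).getD s [] = m.map (fun w => w.getD s 0) := by
  obtain ⟨h1, h2⟩ := h
  have hhead' : (m.head?.getD []).length = C := by
    cases m with
    | nil => simp at h1; omega
    | cons row t => simpa using h2 row List.mem_cons_self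
  unfold pvT
  rw [List.getD_eq_getElem _ [] (by simp [hhead']; omega), List.getElem_map,
      List.getElem_range]

theorem pvCol_getD (m : List (List Int)) {R C : Nat} (h : pvShape m R C) (r s : Nat)
    (hr : r < R) : (m.map (fun w => w.getD s 0)).getD r 0 = pvVal m r s := by
  have hm : m.length = R := h.1
  rw [List.getD_eq_getElem _ 0 (by simp [hm]; omega), List.getElem_map]
  unfold pvVal
  rw [List.getD_eq_getElem m [] (by omega)]

theorem pvShape_mapSweepSelf (bg : Int) (m : List (List Int)) {a b : Nat}
    (h : pvShape m a b) : pvShape (m.map (fun c => pvSweep bg none c c)) a b := by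
  obtain ⟨h1, h2⟩ := h
  refine ⟨by simpa using h1, ?_⟩
  intro row hrow
  simp only [List.mem_map] at hrow
  obtain ⟨c, hc, rfl⟩ := hrow
  rw [pvSweep_length, h2 _ hc]
  simp

theorem pvShape_sweepRows (bg : Int) (x y : List (List Int)) {a b : Nat}
    (hx : pvShape x a b) (hy : pvShape y a b) :
    pvShape ((x.zip y).map (fun p => pvSweep bg none p.1 p.2)) a b := by
  refine ⟨by simp [hx.1, hy.1], ?_⟩
  intro row hrow
  simp only [List.mem_map] at hrow
  obtain ⟨p, hp, rfl⟩ := hrow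
  obtain ⟨hp1, hp2⟩ := List.of_mem_zip hp
  rw [pvSweep_length, hx.2 _ hp1, hy.2 _ hp2]
  simp

theorem pvShape_sweepRevRows (bg : Int) (x y : List (List Int)) {a b : Nat}
    (hx : pvShape x a b) (hy : pvShape y a b) :
    pvShape ((x.zip y).map (fun p => pvSweepRev bg p.1 p.2)) a b := by
  refine ⟨by simp [hx.1, hy.1], ?_⟩
  intro row hrow
  simp only [List.mem_map] at hrow
  obtain ⟨p, hp, rfl⟩ := hrow
  obtain ⟨hp1, hp2⟩ := List.of_mem_zip hp
  rw [pvSweepRev_length, hx.2 _ hp1, hy.2 _ hp2]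
  simp

theorem pv_b_spec (g : List (List Int)) (bg : Int) (R C : Nat)
    (hR : 0 < R) (hC : 0 < C) (hg : pvShape g R C) (r s : Nat) (hr : r < R) (hs : s < C) :
    pvVal (pvT (((pvT g).zip (pvT ((g.zip ((g.zip (pvT ((pvT g).map (fun c => pvSweep bg none c c)))).map
        (fun p => pvSweep bg none p.1 p.2))).map (fun p => pvSweepRev bg p.1 p.2)))).map
        (fun p => pvSweepRev bg p.1 p.2))) r s = pvSpecCell g bg r s := by
  have hgl : g.length = R := hg.1
  have shT : pvShape (pvT g) C R := pvT_shape hg hR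
  have shM1 : pvShape ((pvT g).map (fun c => pvSweep bg none c c)) C R :=
    pvShape_mapSweepSelf bg _ shT
  have sh1 : pvShape (pvT ((pvT g).map (fun c => pvSweep bg none c c))) R C :=
    pvT_shape shM1 hC
  have sh2 : pvShape ((g.zip (pvT ((pvT g).map (fun c => pvSweep bg none c c)))).map
      (fun p => pvSweep bg none p.1 p.2)) R C := pvShape_sweepRows bg _ _ hg sh1
  have sh3 : pvShape ((g.zip ((g.zip (pvT ((pvT g).map (fun c => pvSweep bg none c c)))).map
      (fun p => pvSweep bg none p.1 p.2))).map (fun p => pvSweepRev bg p.1 p.2)) R C :=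
    pvShape_sweepRevRows bg _ _ hg sh2
  have shT3 : pvShape (pvT ((g.zip ((g.zip (pvT ((pvT g).map (fun c => pvSweep bg none c c)))).map
      (fun p => pvSweep bg none p.1 p.2))).map (fun p => pvSweepRev bg p.1 p.2))) C R :=
    pvT_shape sh3 hR
  have shM4 : pvShape (((pvT g).zip (pvT ((g.zip ((g.zip (pvT ((pvT g).map
      (fun c => pvSweep bg none c c)))).map (fun p => pvSweep bg none p.1 p.2))).map
      (fun p => pvSweepRev bg p.1 p.2)))).map (fun p => pvSweepRev bg p.1 p.2)) C R :=
    pvShape_sweepRevRows bg _ _ shT shT3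
  have hcolr : (g.map (fun w => w.getD s 0)).getD r 0 = pvVal g r s := pvCol_getD g hg r s hr
  have hrowlen : (g.getD r []).length = C := pvShape_val hg hr
  -- layer 1 value
  have hv1 : pvVal (pvT ((pvT g).map (fun c => pvSweep bg none c c))) r s =
      if (pvVal g r s != bg) = true then pvVal g r s
      else (pvF bg none ((g.map (fun w => w.getD s 0)).take r)).getD (pvVal g r s) := by
    rw [pvT_val shM1 hC hs hr]
    unfold pvVal
    rw [pvGetD_map_row _ _ s (by rw [shT.1]; omega), pvT_getD_col g hg hR s hs,
        pvSweep_val bg none _ _ r (by simp [hgl]; omega) (by simp [hgl]; omega), hcolr]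
    rfl
  -- layer 2 value
  have hv2 : pvVal ((g.zip (pvT ((pvT g).map (fun c => pvSweep bg none c c)))).map
      (fun p => pvSweep bg none p.1 p.2)) r s =
      if (pvVal g r s != bg) = true
      then pvVal (pvT ((pvT g).map (fun c => pvSweep bg none c c))) r s
      else (pvF bg none ((g.getD r []).take s)).getD
        (pvVal (pvT ((pvT g).map (fun c => pvSweep bg none c c))) r s) := by
    conv_lhs => unfold pvVal
    rw [pvGetD_zip_map g _ _ r (by omega) (by rw [sh1.1]; omega),
        pvSweep_val bg none _ _ s (by rw [hrowlen]; omega)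
          (by rw [pvShape_val sh1 hr]; omega)]
    rfl
  -- layer 3 value
  have hv3 : pvVal ((g.zip ((g.zip (pvT ((pvT g).map (fun c => pvSweep bg none c c)))).map
      (fun p => pvSweep bg none p.1 p.2))).map (fun p => pvSweepRev bg p.1 p.2)) r s =
      if (pvVal g r s != bg) = true
      then pvVal ((g.zip (pvT ((pvT g).map (fun c => pvSweep bg none c c)))).map
        (fun p => pvSweep bg none p.1 p.2)) r s
      else ((((g.getD r []).drop (s+1)).filter (fun v => v != bg)).head?).getD
        (pvVal ((g.zip (pvT ((pvT g).map (fun c => pvSweep bg none c c)))).map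
          (fun p => pvSweep bg none p.1 p.2)) r s) := by
    conv_lhs => unfold pvVal
    rw [pvGetD_zip_map g _ _ r (by omega) (by rw [sh2.1]; omega),
        pvSweepRev_val bg _ _ s (by rw [hrowlen, pvShape_val sh2 hr]) (by omega)]
    rfl
  -- layer 4 value
  have hv4 : pvVal (pvT (((pvT g).zip (pvT ((g.zip ((g.zip (pvT ((pvT g).map
      (fun c => pvSweep bg none c c)))).map (fun p => pvSweep bg none p.1 p.2))).map
      (fun p => pvSweepRev bg p.1 p.2)))).map (fun p => pvSweepRev bg p.1 p.2))) r s =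
      if (pvVal g r s != bg) = true
      then pvVal ((g.zip ((g.zip (pvT ((pvT g).map (fun c => pvSweep bg none c c)))).map
        (fun p => pvSweep bg none p.1 p.2))).map (fun p => pvSweepRev bg p.1 p.2)) r s
      else ((((g.map (fun w => w.getD s 0)).drop (r+1)).filter (fun v => v != bg)).head?).getD
        (pvVal ((g.zip ((g.zip (pvT ((pvT g).map (fun c => pvSweep bg none c c)))).map
          (fun p => pvSweep bg none p.1 p.2))).map (fun p => pvSweepRev bg p.1 p.2)) r s) := by
    rw [pvT_val shM4 hC hs hr]
    conv_lhs => unfold pvVal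
    rw [pvGetD_zip_map _ _ _ s (by rw [shT.1]; omega) (by rw [shT3.1]; omega),
        pvT_getD_col g hg hR s hs,
        pvT_getD_col _ sh3 hR s hs,
        pvSweepRev_val bg _ _ r (by rw [List.length_map, List.length_map, hgl, sh3.1])
          (by rw [List.length_map, hgl]; omega),
        hcolr, pvCol_getD _ sh3 r s hr]
  rw [hv4, hv3, hv2, hv1]
  by_cases hbg : (pvVal g r s != bg) = true
  · simp only [hbg, if_true]
    simp [pvSpecCell, hbg]
  · have hbf : (pvVal g r s != bg) = false := by simpa using hbg
    simp only [hbf, Bool.false_eq_true, if_false]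
    rw [pvF_eq, pvF_eq, Option.or_none, Option.or_none]
    simp only [pvSpecCell, hbf, Bool.false_eq_true, if_false]
    rw [pvOption_getD_or, pvOption_getD_or, pvOption_getD_or]

theorem pvVal_eq_getElem (m : List (List Int)) (r s : Nat) (h1 : r < m.length)
    (h2 : s < (m[r]'h1).length) : pvVal m r s = (m[r]'h1)[s]'h2 := by
  unfold pvVal
  rw [List.getD_eq_getElem m [] h1, List.getD_eq_getElem _ 0 h2]

theorem pvFoldl_shape (g : List (List Int)) (bg : Int) (R C : Nat)
    (cl : List (Nat × Nat)) : ∀ res, pvShape res R C →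
    pvShape (cl.foldl (pvStep g bg R C) res) R C := by
  induction cl with
  | nil => intro res h; exact h
  | cons p t ih => intro res h; exact ih _ (pvStep_shape g bg R C res p h)

-- shapes of the two results
theorem pv_a_shape (g : List (List Int)) (bg : Int) (R C : Nat) (hg : pvShape g R C) :
    pvShape ((List.range R).foldl (fun res i =>
      (List.range C).foldl (fun res j =>
        if pvVal g i j = bg then res
        else
          pvRayCol g bg (pvVal g i j) j ((List.range i).reverse)
            (pvRayCol g bg (pvVal g i j) j (List.range' (i+1) (R - (i+1)))
              (pvRayRow g bg (pvVal g i j) i ((List.range j).reverse)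
                (pvRayRow g bg (pvVal g i j) i (List.range' (j+1) (C - (j+1))) res)))) res) g) R C := by
  rw [pvFold_eq_cells g bg R C g]
  exact pvFoldl_shape g bg R C (pvCells R C) g hg

theorem pv_b_shape (g : List (List Int)) (bg : Int) (R C : Nat)
    (hR : 0 < R) (hC : 0 < C) (hg : pvShape g R C) :
    pvShape (pvT (((pvT g).zip (pvT ((g.zip ((g.zip (pvT ((pvT g).map (fun c => pvSweep bg none c c)))).map
        (fun p => pvSweep bg none p.1 p.2))).map (fun p => pvSweepRev bg p.1 p.2)))).map
        (fun p => pvSweepRev bg p.1 p.2))) R C := by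
  exact pvT_shape (pvShape_sweepRevRows bg _ _ (pvT_shape hg hR)
    (pvT_shape (pvShape_sweepRevRows bg _ _ hg (pvShape_sweepRows bg _ _ hg
      (pvT_shape (pvShape_mapSweepSelf bg _ (pvT_shape hg hR)) hC))) hR)) hC

-- ===== VERDICT (by name: the statement is the Claim_ definition above) =====
theorem ray_fill_all_spec : Claim_equal_ray_fill_all := by
  intro g hdom hpre
  unfold Spec_ray_fill_all ray_fill_all ray_fill_all_alt
  by_cases hguard : g = [] ∨ g.headD [] = []
  · rw [if_pos hguard, if_pos hguard]
  · rw [if_neg hguard, if_neg hguard]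
    push_neg at hguard
    obtain ⟨hg1, hg2⟩ := hguard
    have hR : 0 < g.length := List.length_pos_iff.mpr hg1
    have hC : 0 < (g.headD []).length := List.length_pos_iff.mpr hg2
    have hg : pvShape g g.length (g.headD []).length := ⟨rfl, hpre hg1 hg2⟩
    have hA := pv_a_shape g (bgOf g) g.length (g.headD []).length hg
    have hB := pv_b_shape g (bgOf g) g.length (g.headD []).length hR hC hg
    apply List.ext_getElem
    · exact hA.1.trans hB.1.symm
    · intro r h1 h2
      have hrR : r < g.length := lt_of_lt_of_eq h1 hA.1
      apply List.ext_getElem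
      · exact (hA.2 _ (List.getElem_mem _)).trans (hB.2 _ (List.getElem_mem _)).symm
      · intro s hs1 hs2
        have hsC : s < (g.headD []).length := lt_of_lt_of_eq hs1 (hA.2 _ (List.getElem_mem _))
        exact (pvVal_eq_getElem _ r s h1 hs1).symm.trans
          ((pv_a_spec g (bgOf g) g.length (g.headD []).length hR hC hg r s hrR hsC).trans
           ((pv_b_spec g (bgOf g) g.length (g.headD []).length hR hC hg r s hrR hsC).symm.trans
            (pvVal_eq_getElem _ r s h2 hs2)))
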